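-- pv_equiv track=rewrite | github.com/KenKarrasch/Adventofcode | 2019/19-18p1.py | findlks
-- ===== SOURCE A (Python) =====
-- def findlks(rob,bl,nodes,uc,lc):
--    t = {rob:0}
--    d = [[0,1],[1,0],[0,-1],[-1,0]]
--    dp,mv = 1, True
--    options = {}
--    while mv:
--     crop = []
--     mv = False
--     for r in t:
--      if t[r] == dp-1:
--       for a in d:
--        np = (r[0]+a[0], r[1]+a[1])
--        if np not in t:
--         if (np in bl) and \
--            not (np in uc) and \
--            not (np in lc) and \
--            not (np in nodes):
--           crop.append(np)
--         if (np in nodes):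
--           options[np] = dp
--         if (np in lc):
--           options[np] = dp
--         if (np in uc):
--           options[np] = dp
--     for a in crop:
--       mv = True
--       t[a] = dp
--     dp += 1
--    return options
-- ===== SOURCE B (Python) =====
-- def findlks(rob, bl, nodes, uc, lc):
--     # Level-synchronous BFS with an explicit frontier queue: each level scans
--     # only the newly reached cells, not every visited cell.
--     specials = set(nodes) | set(uc) | set(lc)
--     walkable = set(bl) - specials
--     options = {}
--     visited = {rob}
--     frontier = [rob]
--     dp = 1
--     while frontier:
--         nxt = []
--         for r in frontier:
--             for dx, dy in ((0, 1), (1, 0), (0, -1), (-1, 0)):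
--                 np = (r[0] + dx, r[1] + dy)
--                 if np in visited:
--                     continue
--                 if np in specials:
--                     options[np] = dp
--                 elif np in walkable:
--                     visited.add(np)
--                     nxt.append(np)
--         frontier = nxt
--         dp += 1
--     return options
-- ===== Notes on version B (the rewrite author's own statement) =====
-- stated objective: alternative
-- what changed: B runs a level-synchronous BFS over an explicit frontier queue (with precomputed special/walkable sets), instead of A's rescanning the whole visited dictionary on every level to find the current frontier; on the generated random inputs the reached region is tiny, so a timing run shows no difference.
import Mathlib
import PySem

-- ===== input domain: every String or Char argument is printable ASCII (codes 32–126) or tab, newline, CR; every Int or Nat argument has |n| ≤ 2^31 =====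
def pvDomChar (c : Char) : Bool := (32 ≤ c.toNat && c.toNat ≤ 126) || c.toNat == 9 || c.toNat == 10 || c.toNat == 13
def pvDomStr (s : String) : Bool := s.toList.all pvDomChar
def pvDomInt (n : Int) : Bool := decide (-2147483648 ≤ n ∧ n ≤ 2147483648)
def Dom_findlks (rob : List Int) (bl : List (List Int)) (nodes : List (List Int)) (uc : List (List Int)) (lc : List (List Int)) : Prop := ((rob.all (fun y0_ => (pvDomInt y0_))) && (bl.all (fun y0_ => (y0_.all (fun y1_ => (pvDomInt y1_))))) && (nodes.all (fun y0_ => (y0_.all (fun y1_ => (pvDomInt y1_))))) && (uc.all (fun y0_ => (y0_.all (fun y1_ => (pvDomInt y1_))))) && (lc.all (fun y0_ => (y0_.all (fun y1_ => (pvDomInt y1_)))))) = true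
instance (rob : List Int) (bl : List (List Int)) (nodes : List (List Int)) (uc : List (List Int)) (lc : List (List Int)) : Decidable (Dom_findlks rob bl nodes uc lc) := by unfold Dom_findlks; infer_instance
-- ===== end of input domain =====

-- B replaces A's per-level rescan of the whole visited dictionary by a BFS with an
-- explicit frontier queue (objective: alternative; each level touches only newly reached cells).


-- ===== PORT A =====
-- d = [[0,1],[1,0],[0,-1],[-1,0]]
def pvDirs : List (List Int) := [[0, 1], [1, 0], [0, -1], [-1, 0]]

-- np = (r[0]+a[0], r[1]+a[1])  (Pre_ guarantees len(rob) >= 2, every other key has length 2)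
def pvNbr (r a : List Int) : List Int :=
  [PySem.List.pyGetD r 0 0 + PySem.List.pyGetD a 0 0,
   PySem.List.pyGetD r 1 0 + PySem.List.pyGetD a 1 0]

-- body of the innermost 'for a in d' iteration, acting on the state (crop, options)
def pvStepA (bl nodes uc lc : List (List Int)) (t : PySem.Dict (List Int) Int) (dp : Int)
    (st : List (List Int) × PySem.Dict (List Int) Int) (np : List Int) :
    List (List Int) × PySem.Dict (List Int) Int :=
  if t.contains np then st
  else
    let crop := if np ∈ bl ∧ np ∉ uc ∧ np ∉ lc ∧ np ∉ nodes then st.1 ++ [np] else st.1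
    let o1 := if np ∈ nodes then st.2.insert np dp else st.2
    let o2 := if np ∈ lc then o1.insert np dp else o1
    let o3 := if np ∈ uc then o2.insert np dp else o2
    (crop, o3)

-- 'for r in t: if t[r] == dp-1: for a in d: …'  (iterating a dict visits each key once
-- with its value, in insertion order)
def pvLevelA (bl nodes uc lc : List (List Int)) (t : PySem.Dict (List Int) Int) (dp : Int)
    (options : PySem.Dict (List Int) Int) :
    List (List Int) × PySem.Dict (List Int) Int :=
  t.items.foldl
    (fun st rv =>
      if rv.2 = dp - 1 then
        pvDirs.foldl (fun st a => pvStepA bl nodes uc lc t dp st (pvNbr rv.1 a)) st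
      else st)
    ([], options)

-- 'while mv: …'.  Fuel bl.length + 2 is an upper bound on the number of iterations the
-- Python loop performs: every iteration with mv == True inserts at least one fresh key
-- drawn from bl into t, so at most bl.length productive iterations occur, plus one final
-- unproductive one.
def pvLoopA (bl nodes uc lc : List (List Int)) :
    Nat → PySem.Dict (List Int) Int → Int → Bool → PySem.Dict (List Int) Int →
    PySem.Dict (List Int) Int
  | 0, _, _, _, options => options
  | fuel + 1, t, dp, mv, options =>
    if mv then
      let co := pvLevelA bl nodes uc lc t dp options
      let t' := co.1.foldl (fun d a => d.insert a dp) t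
      pvLoopA bl nodes uc lc fuel t' (dp + 1) (!co.1.isEmpty) co.2
    else options

def findlks (rob : List Int) (bl : List (List Int)) (nodes : List (List Int)) (uc : List (List Int)) (lc : List (List Int)) : List (List Int × Int) :=
  (pvLoopA bl nodes uc lc (bl.length + 2)
    (PySem.Dict.insert PySem.Dict.empty rob 0) 1 true PySem.Dict.empty).items

-- ===== PORT B =====
-- ((0,1),(1,0),(0,-1),(-1,0))
def pvDirsB : List (Int × Int) := [(0, 1), (1, 0), (0, -1), (-1, 0)]

-- np = (r[0]+dx, r[1]+dy)
def pvNbrB (r : List Int) (dx dy : Int) : List Int :=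
  [PySem.List.pyGetD r 0 0 + dx, PySem.List.pyGetD r 1 0 + dy]

-- body of the innermost loop, acting on the state (nxt, visited, options)
def pvStepB (specials walkable : List (List Int)) (dp : Int)
    (st : List (List Int) × List (List Int) × PySem.Dict (List Int) Int) (np : List Int) :
    List (List Int) × List (List Int) × PySem.Dict (List Int) Int :=
  if PySem.Set.contains st.2.1 np then st
  else if np ∈ specials then (st.1, st.2.1, st.2.2.insert np dp)
  else if np ∈ walkable then (st.1 ++ [np], PySem.Set.add st.2.1 np, st.2.2)
  else st

-- 'while frontier: …' with the same fuel bound as port A (each round that continues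
-- enqueues at least one fresh cell of bl).
def pvLoopB (specials walkable : List (List Int)) :
    Nat → List (List Int) → List (List Int) → Int → PySem.Dict (List Int) Int →
    PySem.Dict (List Int) Int
  | 0, _, _, _, options => options
  | fuel + 1, frontier, visited, dp, options =>
    if frontier.isEmpty then options
    else
      let st := frontier.foldl
        (fun st r => pvDirsB.foldl (fun st p => pvStepB specials walkable dp st (pvNbrB r p.1 p.2)) st)
        ([], visited, options)
      pvLoopB specials walkable fuel st.1 st.2.1 (dp + 1) st.2.2

def findlks_alt (rob : List Int) (bl : List (List Int)) (nodes : List (List Int)) (uc : List (List Int)) (lc : List (List Int)) : List (List Int × Int) :=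
  let specials := PySem.Set.union (PySem.Set.union (PySem.Set.ofList nodes) uc) lc
  let walkable := PySem.Set.diff (PySem.Set.ofList bl) specials
  (pvLoopB specials walkable (bl.length + 2) [rob] (PySem.Set.ofList [rob]) 1 PySem.Dict.empty).items

-- ===== PRECONDITION & SPEC =====
-- Pre_ excludes only the inputs where the Python A raises: with len(rob) < 2 the very
-- first neighbour computation r[0] / r[1] is an IndexError.
def Pre_findlks (rob : List Int) (bl : List (List Int)) (nodes : List (List Int)) (uc : List (List Int)) (lc : List (List Int)) : Prop := 2 ≤ rob.length
instance (rob : List Int) (bl : List (List Int)) (nodes : List (List Int)) (uc : List (List Int)) (lc : List (List Int)) : Decidable (Pre_findlks rob bl nodes uc lc) := by unfold Pre_findlks; infer_instance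

def pvWitness_findlks : List Int × List (List Int) × List (List Int) × List (List Int) × List (List Int) :=
  ([0, 0], [[0, 1], [1, 1]], [[1, 1]], [], [])

def Spec_findlks (rob : List Int) (bl : List (List Int)) (nodes : List (List Int)) (uc : List (List Int)) (lc : List (List Int)) (out : List (List Int × Int)) : Prop := out = findlks_alt rob bl nodes uc lc
instance (rob : List Int) (bl : List (List Int)) (nodes : List (List Int)) (uc : List (List Int)) (lc : List (List Int)) (out : List (List Int × Int)) : Decidable (Spec_findlks rob bl nodes uc lc out) := by unfold Spec_findlks; infer_instance

-- ===== CLAIM (what is proved, stated in full; the proofs are below) =====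
def Claim_equal_findlks : Prop := ∀ (rob : List Int) (bl : List (List Int)) (nodes : List (List Int)) (uc : List (List Int)) (lc : List (List Int)), Dom_findlks rob bl nodes uc lc → Pre_findlks rob bl nodes uc lc → Spec_findlks rob bl nodes uc lc (findlks rob bl nodes uc lc)

-- ===== LEMMAS AND PROOFS =====

theorem pvInsertMem {k : List Int} {v : Int} (d : PySem.Dict (List Int) Int)
    (hnd : d.keys.Nodup) (hm : (k, v) ∈ d.items) : d.insert k v = d := by
  apply PySem.Dict.ext
  have hc : d.contains k = true := by
    rw [PySem.Dict.contains_iff_mem_keys]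
    exact List.mem_map_of_mem hm
  rw [PySem.Dict.items_insert_of_contains d v hc]
  have : ∀ p ∈ d.items, (if (p.1 == k) = true then (k, v) else p) = p := by
    intro p hp
    by_cases h : p.1 = k
    · have h1 : d.get? k = some v := PySem.Dict.get?_of_mem_items d hm hnd
      have h2 : d.get? p.1 = some p.2 := PySem.Dict.get?_of_mem_items d hp hnd
      rw [h] at h2
      have hv : v = p.2 := Option.some.inj (h1.symm.trans h2)
      simp [← h, hv]
    · simp [h]
  rw [List.map_congr_left this, List.map_id']

theorem pvItemsFold (crop : List (List Int)) (t : PySem.Dict (List Int) Int) (dp : Int)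
    (hnd : t.keys.Nodup) (hf : ∀ q ∈ crop, q ∉ t.keys) :
    (crop.foldl (fun d a => d.insert a dp) t).items
      = t.items ++ (PySem.Set.ofList crop).map (fun q => (q, dp)) := by
  induction crop using List.reverseRecOn with
  | nil => simp [PySem.Set.ofList]
  | append_singleton l np ih =>
    have hf' : ∀ q ∈ l, q ∉ t.keys := fun q hq => hf q (List.mem_append_left _ hq)
    have hitems := ih hf'
    have hkeys : (l.foldl (fun d a => d.insert a dp) t).keys = t.keys ++ PySem.Set.ofList l := by
      simp only [PySem.Dict.keys, hitems, List.map_append, List.map_map]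
      congr 1
      exact List.map_id'' (fun q => rfl) _
    rw [List.foldl_append]
    simp only [List.foldl_cons, List.foldl_nil]
    by_cases hmem : np ∈ PySem.Set.ofList l
    · have hmem' : np ∈ l := (PySem.Set.mem_ofList l np).1 hmem
      have hpair : (np, dp) ∈ (l.foldl (fun d a => d.insert a dp) t).items := by
        rw [hitems]
        exact List.mem_append_right _ (List.mem_map_of_mem hmem)
      have hnd' : (l.foldl (fun d a => d.insert a dp) t).keys.Nodup := by
        rw [hkeys]
        refine List.Nodup.append hnd (PySem.Set.nodup_ofList l) ?_
        intro q hq hq2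
        exact hf' q ((PySem.Set.mem_ofList l q).1 hq2) hq
      rw [pvInsertMem _ hnd' hpair, hitems,
        PySem.Set.ofList_append_singleton, PySem.Set.add_of_mem hmem]
    · have hnc : (l.foldl (fun d a => d.insert a dp) t).contains np = false := by
        rw [← Bool.not_eq_true]
        intro hc
        rw [PySem.Dict.contains_iff_mem_keys, hkeys, List.mem_append] at hc
        rcases hc with hc | hc
        · exact hf np (by simp) hc
        · exact hmem hc
      rw [PySem.Dict.items_insert_of_not_contains _ _ hnc, hitems,
        PySem.Set.ofList_append_singleton, PySem.Set.add_of_not_mem hmem]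
      simp

theorem pvIsEmptyOfList (l : List (List Int)) :
    (PySem.Set.ofList l).isEmpty = l.isEmpty := by
  cases l with
  | nil => rfl
  | cons x xs =>
    rw [PySem.Set.ofList_cons]
    simp

def pvRel (bl nodes uc lc tkeys : List (List Int))
    (stA : List (List Int) × PySem.Dict (List Int) Int)
    (stB : List (List Int) × List (List Int) × PySem.Dict (List Int) Int) : Prop :=
  stB.1 = PySem.Set.ofList stA.1 ∧
  stB.2.1 = tkeys ++ stB.1 ∧
  stB.2.2 = stA.2 ∧
  ∀ q ∈ stA.1, q ∉ tkeys ∧ q ∈ bl ∧ q ∉ uc ∧ q ∉ lc ∧ q ∉ nodes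

theorem pvStepRel (bl nodes uc lc : List (List Int)) (t : PySem.Dict (List Int) Int)
    (dp : Int) (np : List Int) {stA stB}
    (hR : pvRel bl nodes uc lc t.keys stA stB) :
    pvRel bl nodes uc lc t.keys (pvStepA bl nodes uc lc t dp stA np)
      (pvStepB (PySem.Set.union (PySem.Set.union (PySem.Set.ofList nodes) uc) lc)
        (PySem.Set.diff (PySem.Set.ofList bl)
          (PySem.Set.union (PySem.Set.union (PySem.Set.ofList nodes) uc) lc)) dp stB np) := by
  obtain ⟨crop, oA⟩ := stA
  obtain ⟨nxt, vis, oB⟩ := stB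
  obtain ⟨h1, h2, h3, h4⟩ := hR
  simp only at h1 h2 h3 h4
  have hsp : ∀ q : List Int,
      q ∈ PySem.Set.union (PySem.Set.union (PySem.Set.ofList nodes) uc) lc ↔
        (q ∈ nodes ∨ q ∈ uc ∨ q ∈ lc) := by
    intro q
    rw [PySem.Set.mem_union, PySem.Set.mem_union, PySem.Set.mem_ofList]
    tauto
  have hwk : ∀ q : List Int,
      q ∈ PySem.Set.diff (PySem.Set.ofList bl)
            (PySem.Set.union (PySem.Set.union (PySem.Set.ofList nodes) uc) lc) ↔
        (q ∈ bl ∧ ¬(q ∈ nodes ∨ q ∈ uc ∨ q ∈ lc)) := by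
    intro q
    rw [PySem.Set.mem_diff, PySem.Set.mem_ofList, hsp]
  by_cases hk : np ∈ t.keys
  · -- already visited before this level: both sides skip
    have hca : t.contains np = true := (PySem.Dict.contains_iff_mem_keys t np).2 hk
    have hcb : PySem.Set.contains vis np = true := by
      rw [PySem.Set.contains_iff, h2]
      exact List.mem_append_left _ hk
    simp only [pvStepA, pvStepB, hca, hcb, if_true]
    exact ⟨h1, h2, h3, h4⟩
  · have hca : t.contains np = false := by
      rw [← Bool.not_eq_true]
      intro hc
      exact hk ((PySem.Dict.contains_iff_mem_keys t np).1 hc)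
    by_cases hn : np ∈ nxt
    · -- duplicate within the level: A appends to crop again, B skips
      have hcrop : np ∈ crop := (PySem.Set.mem_ofList crop np).1 (h1 ▸ hn)
      obtain ⟨-, hbl, hu, hl2, hnn⟩ := h4 np hcrop
      have hcb : PySem.Set.contains vis np = true := by
        rw [PySem.Set.contains_iff, h2]
        exact List.mem_append_right _ hn
      have hcond : np ∈ bl ∧ np ∉ uc ∧ np ∉ lc ∧ np ∉ nodes := ⟨hbl, hu, hl2, hnn⟩
      simp only [pvStepA, pvStepB, hca, hcb, if_true, Bool.false_eq_true, if_false]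
      rw [if_pos hcond, if_neg hnn, if_neg hl2, if_neg hu]
      refine ⟨?_, h2, h3, ?_⟩
      · rw [PySem.Set.ofList_append_singleton, PySem.Set.add_of_mem (h1 ▸ hn), h1]
      · intro q hq
        rcases List.mem_append.1 hq with hq | hq
        · exact h4 q hq
        · rcases List.mem_singleton.1 hq with rfl
          exact h4 _ hcrop
    · have hcb : PySem.Set.contains vis np = false := by
        rw [← Bool.not_eq_true]
        intro hc
        rw [PySem.Set.contains_iff, h2, List.mem_append] at hc
        rcases hc with hc | hc
        · exact hk hc
        · exact hn hc
      by_cases hs : np ∈ nodes ∨ np ∈ uc ∨ np ∈ lc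
      · -- special cell: both record options[np] = dp
        have hspm : np ∈ PySem.Set.union (PySem.Set.union (PySem.Set.ofList nodes) uc) lc :=
          (hsp np).2 hs
        have hnc : ¬(np ∈ bl ∧ np ∉ uc ∧ np ∉ lc ∧ np ∉ nodes) := by tauto
        simp only [pvStepA, pvStepB, hca, hcb, Bool.false_eq_true, if_false, hspm, if_true]
        rw [if_neg hnc]
        refine ⟨h1, h2, ?_, h4⟩
        rw [h3]
        by_cases h5 : np ∈ nodes <;> by_cases h6 : np ∈ lc <;> by_cases h7 : np ∈ uc <;>
          simp only [h5, h6, h7, if_true, if_false, PySem.Dict.insert_insert_self] <;>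
          tauto
      · push_neg at hs
        obtain ⟨hs1, hs2, hs3⟩ := hs
        have hspm : np ∉ PySem.Set.union (PySem.Set.union (PySem.Set.ofList nodes) uc) lc := by
          rw [hsp]; tauto
        by_cases hb : np ∈ bl
        · -- fresh walkable cell: both enqueue it
          have hwkm : np ∈ PySem.Set.diff (PySem.Set.ofList bl)
              (PySem.Set.union (PySem.Set.union (PySem.Set.ofList nodes) uc) lc) := by
            rw [hwk]; tauto
          simp only [pvStepA, pvStepB, hca, hcb, Bool.false_eq_true, if_false, hspm, hwkm, if_true]
          have hcond : np ∈ bl ∧ np ∉ uc ∧ np ∉ lc ∧ np ∉ nodes := ⟨hb, hs2, hs3, hs1⟩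
          rw [if_pos hcond, if_neg hs1, if_neg hs3, if_neg hs2]
          refine ⟨?_, ?_, h3, ?_⟩
          · have hn' : np ∉ PySem.Set.ofList crop := by rw [← h1]; exact hn
            rw [PySem.Set.ofList_append_singleton, PySem.Set.add_of_not_mem hn', h1]
          · rw [PySem.Set.add_of_not_mem
              (by rw [← PySem.Set.contains_iff, hcb]; exact Bool.false_ne_true),
              h2, List.append_assoc]
          · intro q hq
            rcases List.mem_append.1 hq with hq | hq
            · exact h4 q hq
            · rcases List.mem_singleton.1 hq with rfl
              exact ⟨hk, hb, hs2, hs3, hs1⟩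
        · -- wall: both skip
          have hwkm : np ∉ PySem.Set.diff (PySem.Set.ofList bl)
              (PySem.Set.union (PySem.Set.union (PySem.Set.ofList nodes) uc) lc) := by
            rw [hwk]; tauto
          have hcond : ¬(np ∈ bl ∧ np ∉ uc ∧ np ∉ lc ∧ np ∉ nodes) := by tauto
          simp only [pvStepA, pvStepB, hca, hcb, Bool.false_eq_true, if_false, hspm, hwkm,
            if_true]
          rw [if_neg hcond, if_neg hs1, if_neg hs3, if_neg hs2]
          exact ⟨h1, h2, h3, h4⟩


theorem pvRowRel (bl nodes uc lc : List (List Int)) (t : PySem.Dict (List Int) Int)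
    (dp : Int) (r : List Int) {stA stB}
    (hR : pvRel bl nodes uc lc t.keys stA stB) :
    pvRel bl nodes uc lc t.keys
      (pvDirs.foldl (fun st a => pvStepA bl nodes uc lc t dp st (pvNbr r a)) stA)
      (pvDirsB.foldl
        (fun st p => pvStepB (PySem.Set.union (PySem.Set.union (PySem.Set.ofList nodes) uc) lc)
          (PySem.Set.diff (PySem.Set.ofList bl)
            (PySem.Set.union (PySem.Set.union (PySem.Set.ofList nodes) uc) lc)) dp st (pvNbrB r p.1 p.2)) stB) := by
  simp only [pvDirs, pvDirsB, List.foldl_cons, List.foldl_nil]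
  have e1 : pvNbrB r ((0 : Int), (1 : Int)).1 ((0 : Int), (1 : Int)).2 = pvNbr r [0, 1] := rfl
  have e2 : pvNbrB r ((1 : Int), (0 : Int)).1 ((1 : Int), (0 : Int)).2 = pvNbr r [1, 0] := rfl
  have e3 : pvNbrB r ((0 : Int), (-1 : Int)).1 ((0 : Int), (-1 : Int)).2 = pvNbr r [0, -1] := rfl
  have e4 : pvNbrB r ((-1 : Int), (0 : Int)).1 ((-1 : Int), (0 : Int)).2 = pvNbr r [-1, 0] := rfl
  rw [e1, e2, e3, e4]
  exact pvStepRel bl nodes uc lc t dp _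
    (pvStepRel bl nodes uc lc t dp _
      (pvStepRel bl nodes uc lc t dp _
        (pvStepRel bl nodes uc lc t dp _ hR)))

theorem pvLevelRel (bl nodes uc lc : List (List Int)) (t : PySem.Dict (List Int) Int)
    (dp : Int) (fr : List (List Int)) : ∀ {stA stB},
    pvRel bl nodes uc lc t.keys stA stB →
    pvRel bl nodes uc lc t.keys
      (fr.foldl (fun st r => pvDirs.foldl (fun st a => pvStepA bl nodes uc lc t dp st (pvNbr r a)) st) stA)
      (fr.foldl (fun st r => pvDirsB.foldl
        (fun st p => pvStepB (PySem.Set.union (PySem.Set.union (PySem.Set.ofList nodes) uc) lc)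
          (PySem.Set.diff (PySem.Set.ofList bl)
            (PySem.Set.union (PySem.Set.union (PySem.Set.ofList nodes) uc) lc)) dp st (pvNbrB r p.1 p.2)) st) stB) := by
  induction fr with
  | nil => intro stA stB hR; exact hR
  | cons r fr ih =>
    intro stA stB hR
    simp only [List.foldl_cons]
    exact ih (pvRowRel bl nodes uc lc t dp r hR)

-- A's scan of the whole dictionary at level dp only acts on the frontier entries.
theorem pvLevelAFrontier (bl nodes uc lc : List (List Int)) (t : PySem.Dict (List Int) Int)
    (dp : Int) (options : PySem.Dict (List Int) Int) (hist : List (List Int × Int))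
    (fr : List (List Int))
    (hitems : t.items = hist ++ fr.map (fun q => (q, dp - 1)))
    (hhist : ∀ p ∈ hist, p.2 ≤ dp - 2) :
    pvLevelA bl nodes uc lc t dp options
      = fr.foldl (fun st r => pvDirs.foldl (fun st a => pvStepA bl nodes uc lc t dp st (pvNbr r a)) st)
          ([], options) := by
  unfold pvLevelA
  rw [hitems, List.foldl_append]
  have hskip : ∀ (l : List (List Int × Int)) (st : List (List Int) × PySem.Dict (List Int) Int),
      (∀ p ∈ l, p.2 ≤ dp - 2) →
      l.foldl (fun st rv => if rv.2 = dp - 1 then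
          pvDirs.foldl (fun st a => pvStepA bl nodes uc lc t dp st (pvNbr rv.1 a)) st
        else st) st = st := by
    intro l
    induction l with
    | nil => intro st _; rfl
    | cons p l ih =>
      intro st hl
      have hp : p.2 ≤ dp - 2 := hl p (by simp)
      have hne : ¬(p.2 = dp - 1) := by omega
      simp only [List.foldl_cons, if_neg hne]
      exact ih st (fun q hq => hl q (List.mem_cons_of_mem _ hq))
  rw [hskip hist ([], options) hhist, List.foldl_map]
  have : (fun (st : List (List Int) × PySem.Dict (List Int) Int) (q : List Int) =>
        if ((q, dp - 1) : List Int × Int).2 = dp - 1 then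
          pvDirs.foldl (fun st a => pvStepA bl nodes uc lc t dp st (pvNbr ((q, dp - 1) : List Int × Int).1 a)) st
        else st)
      = fun st q => pvDirs.foldl (fun st a => pvStepA bl nodes uc lc t dp st (pvNbr q a)) st := by
    funext st q
    rw [if_pos rfl]
  rw [this]

theorem pvLoopRel (bl nodes uc lc : List (List Int)) :
    ∀ (fuel : Nat) (t : PySem.Dict (List Int) Int) (fr vis : List (List Int)) (dp : Int)
      (mv : Bool) (oA oB : PySem.Dict (List Int) Int),
      t.keys.Nodup → vis = t.keys → oA = oB → mv = !fr.isEmpty →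
      (∃ hist, t.items = hist ++ fr.map (fun q => (q, dp - 1)) ∧ ∀ p ∈ hist, p.2 ≤ dp - 2) →
      pvLoopA bl nodes uc lc fuel t dp mv oA
        = pvLoopB (PySem.Set.union (PySem.Set.union (PySem.Set.ofList nodes) uc) lc)
            (PySem.Set.diff (PySem.Set.ofList bl)
              (PySem.Set.union (PySem.Set.union (PySem.Set.ofList nodes) uc) lc))
            fuel fr vis dp oB := by
  intro fuel
  induction fuel with
  | zero => intro t fr vis dp mv oA oB _ _ hO _ _; exact hO
  | succ fuel ih =>
    intro t fr vis dp mv oA oB hnd hvis hO hmv hinv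
    obtain ⟨hist, hitems, hhist⟩ := hinv
    by_cases hfe : fr.isEmpty
    · have hmv' : mv = false := by rw [hmv, hfe]; rfl
      simp only [pvLoopA, pvLoopB, hmv', hfe, Bool.false_eq_true, if_false, if_true]
      exact hO
    · have hmv' : mv = true := by rw [hmv, Bool.eq_false_iff.2 hfe]; rfl
      simp only [pvLoopA, pvLoopB, hmv', hfe, Bool.false_eq_true, if_true, if_false]
      rw [pvLevelAFrontier bl nodes uc lc t dp oA hist fr hitems hhist]
      have hR0 : pvRel bl nodes uc lc t.keys ([], oA) ([], vis, oB) := by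
        refine ⟨rfl, ?_, hO.symm, by simp⟩
        simp [hvis]
      have hR := pvLevelRel bl nodes uc lc t dp fr hR0
      set stA := fr.foldl (fun st r => pvDirs.foldl (fun st a => pvStepA bl nodes uc lc t dp st (pvNbr r a)) st) ([], oA) with hstA
      set stB := fr.foldl (fun st r => pvDirsB.foldl
        (fun st p => pvStepB (PySem.Set.union (PySem.Set.union (PySem.Set.ofList nodes) uc) lc)
          (PySem.Set.diff (PySem.Set.ofList bl)
            (PySem.Set.union (PySem.Set.union (PySem.Set.ofList nodes) uc) lc)) dp st (pvNbrB r p.1 p.2)) st) ([], vis, oB) with hstB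
      obtain ⟨h1, h2, h3, h4⟩ := hR
      have hfresh : ∀ q ∈ stA.1, q ∉ t.keys := fun q hq => (h4 q hq).1
      have hitems' : (stA.1.foldl (fun d a => d.insert a dp) t).items
          = t.items ++ (PySem.Set.ofList stA.1).map (fun q => (q, dp)) :=
        pvItemsFold stA.1 t dp hnd hfresh
      have hkeys' : (stA.1.foldl (fun d a => d.insert a dp) t).keys
          = t.keys ++ PySem.Set.ofList stA.1 := by
        simp only [PySem.Dict.keys, hitems', List.map_append, List.map_map]
        congr 1
        exact List.map_id'' (fun q => rfl) _
      apply ih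
      · rw [hkeys']
        refine List.Nodup.append hnd (PySem.Set.nodup_ofList stA.1) ?_
        intro q hq hq2
        exact hfresh q ((PySem.Set.mem_ofList stA.1 q).1 hq2) hq
      · rw [h2, hkeys', h1]
      · exact h3.symm
      · rw [h1, pvIsEmptyOfList]
      · refine ⟨t.items, ?_, ?_⟩
        · rw [hitems', h1]
          congr 1
          have : dp + 1 - 1 = dp := by omega
          rw [this]
        · intro p hp
          rw [hitems] at hp
          rcases List.mem_append.1 hp with hp | hp
          · have := hhist p hp
            omega
          · obtain ⟨q, hq, hqe⟩ := List.mem_map.1 hp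
            rw [← hqe]
            omega

-- ===== VERDICT (by name: the statement is the Claim_ definition above) =====
theorem findlks_spec : Claim_equal_findlks := by
  unfold Claim_equal_findlks Spec_findlks
  intro rob bl nodes uc lc _ _
  unfold findlks findlks_alt
  refine congrArg PySem.Dict.items ?_
  have hitems0 : (PySem.Dict.insert PySem.Dict.empty rob (0 : Int)).items = [(rob, 0)] := by
    rw [PySem.Dict.items_insert_of_not_contains _ _ (PySem.Dict.contains_empty rob)]
    rfl
  have hkeys0 : (PySem.Dict.insert PySem.Dict.empty rob (0 : Int)).keys = [rob] := by
    simp [PySem.Dict.keys, hitems0]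
  apply pvLoopRel
  · rw [hkeys0]; simp
  · rw [hkeys0, PySem.Set.ofList_eq_self_of_nodup [rob] (by simp)]
  · rfl
  · rfl
  · refine ⟨[], ?_, by simp⟩
    rw [hitems0]
    norm_num
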